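-- pv_equiv track=rewrite | github.com/gwillen/aises-final-project-2025 | evaluate_code_examples.py | extract_final_answer
-- ===== SOURCE A (Python) =====
-- def extract_final_answer(response: str) -> str:
--     """
--     Extract the final answer from the response, looking for a clean line by itself.
--
--     Args:
--         response: The full response from the AI
--
--     Returns:
--         The extracted answer
--     """
--     # Look for the first line that's not empty and doesn't contain explanations
--     explanation_indicators = ["because", "since", "as", "explanation", "reasoning", "analysis", "therefore", "thus"]
--
--     for line in response.strip().split('\n'):
--         line = line.strip()
--         if not line:
--             continue
--
--         # Check if this line looks like an explanation
--         if any(indicator in line.lower() for indicator in explanation_indicators):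
--             continue
--
--         # Return the first line that doesn't look like an explanation
--         return line
--
--     # If we couldn't find a good line, just return the first non-empty line
--     for line in response.strip().split('\n'):
--         if line.strip():
--             return line.strip()
--
--     return response.strip()
-- ===== SOURCE B (Python) =====
-- def extract_final_answer(response: str) -> str:
--     explanation_indicators = ["because", "since", "as", "explanation", "reasoning", "analysis", "therefore", "thus"]
--     first_nonempty = None
--     for raw in response.strip().split('\n'):
--         line = raw.strip()
--         if not line:
--             continue
--         if first_nonempty is None:
--             first_nonempty = line
--         if not any(ind in line.lower() for ind in explanation_indicators):
--             return line
--     return first_nonempty if first_nonempty is not None else response.strip()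
-- ===== Notes on version B (the rewrite author's own statement) =====
-- stated objective: simpler
-- what changed: Fuses A's two sequential scans over the split lines into a single pass that returns the first clean line immediately and maintains the first non-empty stripped line as a fallback.
import Mathlib
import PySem

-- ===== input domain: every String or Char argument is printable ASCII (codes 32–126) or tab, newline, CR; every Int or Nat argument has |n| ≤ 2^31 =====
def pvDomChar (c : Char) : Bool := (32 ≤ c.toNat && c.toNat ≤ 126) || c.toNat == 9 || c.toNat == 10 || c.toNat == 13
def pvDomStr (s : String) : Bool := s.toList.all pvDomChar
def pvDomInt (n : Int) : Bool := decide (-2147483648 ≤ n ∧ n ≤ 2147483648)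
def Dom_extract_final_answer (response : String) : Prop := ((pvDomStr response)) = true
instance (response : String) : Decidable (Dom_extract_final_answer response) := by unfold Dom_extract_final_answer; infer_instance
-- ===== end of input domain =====

-- B fuses A's two sequential scans over the lines into one pass that keeps the first
-- non-empty stripped line as a fallback; same return value everywhere (objective: simpler).

def pvIndicators : List String :=
  ["because", "since", "as", "explanation", "reasoning", "analysis", "therefore", "thus"]

-- ===== PORT A =====
-- first loop: first non-empty stripped line containing no indicator
def pvLoopA1 : List String → Option String
  | [] => none
  | l :: rest =>
    let line := PySem.Str.strip l
    if line = "" then pvLoopA1 rest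
    else if pvIndicators.any (fun ind => PySem.Str.isIn ind (PySem.Str.lower line)) then
      pvLoopA1 rest
    else some line

-- second loop: first line whose strip is non-empty, stripped
def pvLoopA2 : List String → Option String
  | [] => none
  | l :: rest =>
    if PySem.Str.strip l ≠ "" then some (PySem.Str.strip l) else pvLoopA2 rest

def extract_final_answer (response : String) : String :=
  let lines := (PySem.Str.split? (PySem.Str.strip response) "\n").getD []
  match pvLoopA1 lines with
  | some v => v
  | none =>
    match pvLoopA2 lines with
    | some v => v
    | none => PySem.Str.strip response

-- ===== PORT B =====
-- single pass with maintained first_nonempty accumulator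
def pvLoopB (fallback : String) : List String → Option String → String
  | [], firstNonempty => firstNonempty.getD fallback
  | l :: rest, firstNonempty =>
    let line := PySem.Str.strip l
    if line = "" then pvLoopB fallback rest firstNonempty
    else
      let fne := if firstNonempty.isNone then some line else firstNonempty
      if !(pvIndicators.any (fun ind => PySem.Str.isIn ind (PySem.Str.lower line))) then line
      else pvLoopB fallback rest fne

def extract_final_answer_alt (response : String) : String :=
  pvLoopB (PySem.Str.strip response)
    ((PySem.Str.split? (PySem.Str.strip response) "\n").getD []) none

-- ===== PRECONDITION & SPEC =====
def Spec_extract_final_answer (response : String) (out : String) : Prop := out = extract_final_answer_alt response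
instance (response : String) (out : String) : Decidable (Spec_extract_final_answer response out) := by unfold Spec_extract_final_answer; infer_instance

-- ===== CLAIM (what is proved, stated in full; the proofs are below) =====
def Claim_equal_extract_final_answer : Prop := ∀ (response : String), Dom_extract_final_answer response → Spec_extract_final_answer response (extract_final_answer response)

-- ===== LEMMAS AND PROOFS =====

-- The fused loop equals: first-loop result if any, else the accumulator, else the second loop, else fallback.
theorem pvLoopB_eq (fb : String) :
    ∀ (lines : List String) (acc : Option String),
      pvLoopB fb lines acc =
        match pvLoopA1 lines with
        | some v => v
        | none => ((acc.or (pvLoopA2 lines)).getD fb) := by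
  intro lines
  induction lines with
  | nil => intro acc; cases acc <;> rfl
  | cons l rest ih =>
    intro acc
    simp only [pvLoopB, pvLoopA1, pvLoopA2, ne_eq]
    by_cases h : PySem.Str.strip l = ""
    · rw [if_pos h, if_pos h, if_neg (not_not_intro h)]
      exact ih acc
    · rw [if_neg h, if_neg h, if_pos h]
      by_cases hc :
          (pvIndicators.any fun ind => PySem.Str.isIn ind (PySem.Str.lower (PySem.Str.strip l))) = true
      · rw [if_pos hc, hc]
        simp only [Bool.not_true, Bool.false_eq_true, if_false, ih]
        cases acc <;> rfl
      · rw [if_neg hc]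
        simp only [Bool.not_eq_true] at hc
        rw [hc]
        rfl

theorem extract_final_answer_spec : Claim_equal_extract_final_answer := by
  unfold Claim_equal_extract_final_answer
  intro response _
  unfold Spec_extract_final_answer extract_final_answer extract_final_answer_alt
  rw [pvLoopB_eq]
  generalize (PySem.Str.split? (PySem.Str.strip response) "\n").getD [] = lines
  cases hA : pvLoopA1 lines with
  | some v => simp only [hA]
  | none => cases hA2 : pvLoopA2 lines <;> simp only [hA, hA2] <;> rfl
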